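-- pv_equiv track=rewrite | github.com/tinaarezoomanian/skillbridge | core/pdf_reports.py | _wrap_long_unbroken
-- ===== SOURCE A (Python) =====
-- def _sanitize(text: str) -> str:
--     if text is None:
--         return ""
--     # Remove/control characters that can mess up layout
--     s = str(text).replace("\r", " ").replace("\t", " ")
--     return s
--
-- def _wrap_long_unbroken(text: str, chunk: int = 60) -> str:
--     """
--     Break very long unbroken tokens (like URLs) into smaller chunks by inserting
--     newlines so FPDF has break points.
--     """
--     s = _sanitize(text)
--     if not s:
--         return ""
--
--     out = []
--     for token in s.split(" "):
--         if len(token) <= chunk: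
--             out.append(token)
--         else:
--             pieces = [token[i : i + chunk] for i in range(0, len(token), chunk)]
--             out.append("\n".join(pieces))
--     return " ".join(out)
-- ===== SOURCE B (Python) =====
-- def _sanitize(text: str) -> str:
--     if text is None:
--         return ""
--     # Remove/control characters that can mess up layout
--     s = str(text).replace("\r", " ").replace("\t", " ")
--     return s
--
-- def _wrap_long_unbroken(text: str, chunk: int = 60) -> str:
--     """
--     Single flat scan: keep a counter of characters since the last space and
--     insert a newline before each character that would start a new chunk.
--     """
--     s = _sanitize(text)
--     if not s:
--         return ""
--
--     buf = []
--     cnt = 0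
--     for ch in s:
--         if ch == " ":
--             buf.append(ch)
--             cnt = 0
--         else:
--             if cnt > 0 and cnt % chunk == 0:
--                 buf.append("\n")
--             buf.append(ch)
--             cnt += 1
--     return "".join(buf)
-- ===== Notes on version B (the rewrite author's own statement) =====
-- stated objective: simpler
-- what changed: Replaces the token-list/slice-chunks pipeline (split on spaces, slice each long token into chunk-sized pieces, join twice) by one flat character scan that counts characters since the last space and inserts a newline whenever the counter is a positive multiple of chunk.
-- outside the precondition, e.g. on _wrap_long_unbroken('ab', -1): A returns '', B returns 'a\nb'; on _wrap_long_unbroken('ab', 0): A raises ValueError, B raises ZeroDivisionError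
import Mathlib
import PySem

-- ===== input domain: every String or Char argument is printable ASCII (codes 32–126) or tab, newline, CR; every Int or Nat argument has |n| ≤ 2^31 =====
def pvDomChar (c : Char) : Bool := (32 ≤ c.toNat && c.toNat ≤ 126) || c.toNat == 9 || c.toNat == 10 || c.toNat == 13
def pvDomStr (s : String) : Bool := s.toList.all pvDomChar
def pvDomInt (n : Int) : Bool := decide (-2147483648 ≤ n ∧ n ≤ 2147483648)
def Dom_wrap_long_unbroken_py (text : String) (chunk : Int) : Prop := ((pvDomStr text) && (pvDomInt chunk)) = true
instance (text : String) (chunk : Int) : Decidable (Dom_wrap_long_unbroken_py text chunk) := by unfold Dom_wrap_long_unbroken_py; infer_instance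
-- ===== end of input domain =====

-- B replaces A's split/slice/join pipeline by one flat character scan with a run-length counter (objective: simpler).


-- ===== PORT A =====
-- _sanitize (shared helper of both Pythons; text is a str here, so the None branch is vacuous)
def pvSanitize (text : String) : String :=
  PySem.Str.replace (PySem.Str.replace text "\r" " ") "\t" " "

-- _wrap_long_unbroken, transliterated; string work is done on the code-point list side (exact per PySem)
def wrap_long_unbroken_py (text : String) (chunk : Int) : String :=
  let s := pvSanitize text
  if s = "" then ""
  else
    let tokens := PySem.Chars.splitOn s.toList [' ']           -- s.split(" ")
    let out := tokens.foldl (fun out token =>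
      if (token.length : Int) ≤ chunk then out ++ [token]
      else
        let pieces := (PySem.List.pyRange 0 (token.length : Int) chunk).map
          (fun i => PySem.List.slice token (some i) (some (i + chunk)))
        out ++ [PySem.Chars.join ['\n'] pieces]) []
    String.ofList (PySem.Chars.join [' '] out)

-- ===== PORT B =====
def wrap_long_unbroken_py_alt (text : String) (chunk : Int) : String :=
  let s := pvSanitize text
  if s = "" then ""
  else
    let r := s.toList.foldl (fun (st : List Char × Nat) ch =>
      if ch = ' ' then (st.1 ++ [ch], 0)
      else
        let buf := if 0 < st.2 ∧ PySem.Int.mod (st.2 : Int) chunk = 0 then st.1 ++ ['\n'] else st.1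
        (buf ++ [ch], st.2 + 1)) ([], 0)
    String.ofList r.1

-- ===== PRECONDITION & SPEC =====
-- Pre_ excludes chunk ≤ 0, outside the function's natural domain: at chunk = 0 A raises ValueError (range step 0)
-- whenever some token is nonempty, and at chunk < 0 A silently erases every nonempty token (empty range of pieces),
-- a corner no caller would specify and which B does not mimic.
def Pre_wrap_long_unbroken_py (text : String) (chunk : Int) : Prop := 1 ≤ chunk
instance (text : String) (chunk : Int) : Decidable (Pre_wrap_long_unbroken_py text chunk) := by unfold Pre_wrap_long_unbroken_py; infer_instance
def pvWitness_wrap_long_unbroken_py : String × Int := ("hello world", 3)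
def Spec_wrap_long_unbroken_py (text : String) (chunk : Int) (out : String) : Prop := out = wrap_long_unbroken_py_alt text chunk
instance (text : String) (chunk : Int) (out : String) : Decidable (Spec_wrap_long_unbroken_py text chunk out) := by unfold Spec_wrap_long_unbroken_py; infer_instance

-- ===== CLAIM (what is proved, stated in full; the proofs are below) =====
def Claim_equal_wrap_long_unbroken_py : Prop := ∀ (text : String) (chunk : Int), Dom_wrap_long_unbroken_py text chunk → Pre_wrap_long_unbroken_py text chunk → Spec_wrap_long_unbroken_py text chunk (wrap_long_unbroken_py text chunk)

-- ===== LEMMAS AND PROOFS =====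

-- reference split: what s.split(" ") produces, structurally
def pvF : List Char → List (List Char)
  | [] => [[]]
  | c :: l => if c = ' ' then [] :: pvF l else (c :: (pvF l).headI) :: (pvF l).tail

-- the break B inserts before a non-space character seen at counter n
def pvBrk (chunk : Int) (n : Nat) : List Char :=
  if 0 < n ∧ PySem.Int.mod (n : Int) chunk = 0 then ['\n'] else []

-- B's scan restricted to a space-free segment (never resets)
def pvH (chunk : Int) : Nat → List Char → List Char
  | _, [] => []
  | n, ch :: l => pvBrk chunk n ++ ch :: pvH chunk (n + 1) l

-- B's whole scan as a recursion
def pvG (chunk : Int) : Nat → List Char → List Char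
  | _, [] => []
  | n, ch :: l => if ch = ' ' then ' ' :: pvG chunk 0 l else pvBrk chunk n ++ ch :: pvG chunk (n + 1) l

theorem pvF_ne_nil (l : List Char) : pvF l ≠ [] := by
  cases l with
  | nil => simp [pvF]
  | cons c l => by_cases h : c = ' ' <;> simp [pvF, h]

theorem pvGo_eq (chunk : Int) (l : List Char) : ∀ (fuel : Nat) (cur : List Char) (acc : List (List Char)),
    l.length < fuel →
    PySem.Chars.splitOn.go [' '] fuel l cur acc
      = acc.reverse ++ (cur.reverse ++ (pvF l).headI) :: (pvF l).tail := by
  induction l with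
  | nil =>
    intro fuel cur acc hf
    cases fuel with
    | zero => omega
    | succ f =>
      rw [PySem.Chars.splitOn.go]
      all_goals first | simp [pvF] | omega
  | cons c rest ih =>
    intro fuel cur acc hf
    cases fuel with
    | zero => simp at hf
    | succ f =>
      rw [PySem.Chars.splitOn.go]
      by_cases hc : c = ' '
      · subst hc
        have hp : List.isPrefixOf [' '] (' ' :: rest) = true := by
          simp [List.isPrefixOf]
        simp only [hp, if_pos]
        have hdrop : List.drop [' '].length (' ' :: rest) = rest := rfl
        rw [hdrop, ih f [] ((cur.reverse) :: acc) (by simpa using hf)]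
        have := pvF_ne_nil rest
        cases hF : pvF rest with
        | nil => exact absurd hF this
        | cons a t => simp [pvF, hF]
      · have hp : List.isPrefixOf [' '] (c :: rest) = false := by
          simp [List.isPrefixOf]; exact fun h => absurd h.symm hc
        simp only [hp, Bool.false_eq_true, if_false]
        rw [ih f (c :: cur) acc (by simpa using hf)]
        simp [pvF, hc]

theorem pvSplitOn_eq_pvF (l : List Char) : PySem.Chars.splitOn l [' '] = pvF l := by
  have h := pvGo_eq (0) l (l.length + 1) [] [] (by omega)
  have hne := pvF_ne_nil l
  rw [PySem.Chars.splitOn, h]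
  cases hF : pvF l with
  | nil => exact absurd hF hne
  | cons a t => simp

theorem pvH_append (chunk : Int) (a b : List Char) : ∀ n : Nat,
    pvH chunk n (a ++ b) = pvH chunk n a ++ pvH chunk (n + a.length) b := by
  induction a with
  | nil => intro n; simp [pvH]
  | cons c a ih =>
    intro n
    simp only [List.cons_append, pvH, ih (n + 1), List.length_cons]
    simp only [List.append_assoc, List.cons_append]
    ring_nf

theorem pvH_small (chunk : Int) (hc : 1 ≤ chunk) (t : List Char) : ∀ n : Nat,
    (n : Int) + t.length ≤ chunk → pvH chunk n t = t := by
  induction t with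
  | nil => intro n _; simp [pvH]
  | cons c t ih =>
    intro n hn
    have hb : pvBrk chunk n = [] := by
      unfold pvBrk
      rw [if_neg]
      rintro ⟨hpos, hmod⟩
      have hdvd : chunk ∣ (n : Int) := (PySem.Int.mod_eq_zero_iff_dvd _ _).mp hmod
      have : chunk ≤ (n : Int) := Int.le_of_dvd (by exact_mod_cast hpos) hdvd
      simp only [List.length_cons] at hn; push_cast at hn; omega
    simp only [pvH, hb, List.nil_append, List.cons.injEq, true_and]
    apply ih
    simp only [List.length_cons] at hn; push_cast at hn ⊢; omega

theorem pvH_shift (chunk : Int) (hc : 1 ≤ chunk) (t : List Char) : ∀ n : Nat, 0 < n →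
    pvH chunk (n + chunk.toNat) t = pvH chunk n t := by
  induction t with
  | nil => intro n _; simp [pvH]
  | cons c t ih =>
    intro n hn
    have hb : pvBrk chunk (n + chunk.toNat) = pvBrk chunk n := by
      unfold pvBrk
      have hcast : ((n + chunk.toNat : Nat) : Int) = (n : Int) + chunk := by
        push_cast; omega
      congr 1
      simp only [eq_iff_iff]
      constructor
      · rintro ⟨_, hm⟩
        refine ⟨hn, ?_⟩
        rw [PySem.Int.mod_eq_zero_iff_dvd] at hm ⊢
        rw [hcast] at hm
        exact (dvd_add_right (dvd_refl chunk)).mp (by rwa [add_comm] at hm)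
      · rintro ⟨_, hm⟩
        refine ⟨by omega, ?_⟩
        rw [PySem.Int.mod_eq_zero_iff_dvd] at hm ⊢
        rw [hcast]
        exact dvd_add hm (dvd_refl chunk)
    simp only [pvH, hb, List.cons.injEq, true_and, List.append_cancel_left_eq]
    have : n + chunk.toNat + 1 = (n + 1) + chunk.toNat := by omega
    rw [this, ih (n + 1) (by omega)]

theorem pvH_chunk (chunk : Int) (hc : 1 ≤ chunk) (t : List Char) (ht : t ≠ []) :
    pvH chunk chunk.toNat t = '\n' :: pvH chunk 0 t := by
  cases t with
  | nil => exact absurd rfl ht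
  | cons c t =>
    have hb : pvBrk chunk chunk.toNat = ['\n'] := by
      unfold pvBrk
      rw [if_pos]
      refine ⟨by omega, ?_⟩
      rw [PySem.Int.mod_eq_zero_iff_dvd]
      have : (chunk.toNat : Int) = chunk := by omega
      rw [this]
    have hb0 : pvBrk chunk 0 = [] := by simp [pvBrk]
    simp only [pvH, hb, hb0, List.nil_append, List.cons_append, List.nil_append,
      List.cons.injEq, true_and]
    have : chunk.toNat + 1 = 1 + chunk.toNat := by omega
    rw [this, pvH_shift chunk hc t 1 (by omega)]

-- the chunk list A builds for a (nonempty) token, in Nat form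
theorem pvPieces (chunk : Int) (hc : 1 ≤ chunk) : ∀ len : Nat, ∀ t : List Char, t.length = len → t ≠ [] →
    PySem.Chars.join ['\n'] ((List.range ((t.length - 1) / chunk.toNat + 1)).map
      (fun k => (t.drop (chunk.toNat * k)).take chunk.toNat)) = pvH chunk 0 t := by
  intro len
  induction len using Nat.strong_induction_on with
  | _ len ih =>
    intro t hlen ht
    have hlpos : 0 < t.length := List.length_pos_iff.mpr ht
    set c := chunk.toNat with hcdef
    have hc1 : 1 ≤ c := by omega
    by_cases hle : t.length ≤ c
    · have hdiv : (t.length - 1) / c + 1 = 1 := by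
        rw [Nat.div_eq_of_lt (by omega)]
      rw [hdiv]
      simp only [List.range_one, List.map_cons, List.map_nil, List.drop_zero, Nat.mul_zero]
      rw [List.take_of_length_le hle, PySem.Chars.join_singleton]
      exact (pvH_small chunk hc t 0 (by push_cast; omega)).symm
    · -- t.length > c : peel the first chunk
      push_neg at hle
      have hdiv : (t.length - 1) / c + 1 = ((t.length - c - 1) / c + 1) + 1 := by
        have : t.length - 1 = (t.length - c - 1) + c := by omega
        rw [this, Nat.add_div_right _ (by omega)]
      rw [hdiv, List.range_succ_eq_map]
      simp only [List.map_cons, List.map_map]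
      have hdropdrop : ∀ k : Nat, (t.drop (c * (k + 1))).take c = ((t.drop c).drop (c * k)).take c := by
        intro k
        rw [List.drop_drop]
        congr 2
        ring
      have hmapeq : (List.range ((t.length - c - 1) / c + 1)).map ((fun k => (t.drop (c * k)).take c) ∘ (· + 1))
          = (List.range (((t.drop c).length - 1) / c + 1)).map (fun k => ((t.drop c).drop (c * k)).take c) := by
        rw [List.length_drop]
        apply List.map_congr_left
        intro k _
        exact hdropdrop k
      rw [Nat.mul_zero, List.drop_zero, hmapeq]
      have ht2 : (t.drop c) ≠ [] := by
        apply List.ne_nil_of_length_pos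
        rw [List.length_drop]; omega
      have ihr := ih (t.drop c).length (by rw [List.length_drop]; omega) (t.drop c) rfl ht2
      cases hR : (List.range (((t.drop c).length - 1) / c + 1)).map (fun k => ((t.drop c).drop (c * k)).take c) with
      | nil => simp at hR
      | cons p ps =>
        rw [PySem.Chars.join_cons_cons]
        rw [← hR, ihr]
        have : t.take c ++ ['\n'] ++ pvH chunk 0 (t.drop c)
            = t.take c ++ ('\n' :: pvH chunk 0 (t.drop c)) := by simp
        rw [this, ← pvH_chunk chunk hc _ ht2]
        have hsplit : pvH chunk 0 t = pvH chunk 0 (t.take c ++ t.drop c) := by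
          rw [List.take_append_drop]
        rw [hsplit, pvH_append]
        congr 1
        · exact (pvH_small chunk hc _ 0 (by
            have : (t.take c).length = c := by rw [List.length_take]; omega
            rw [this]; push_cast; omega)).symm
        · congr 1
          rw [List.length_take]
          simp only [Nat.zero_add]
          omega

-- A's per-token transform equals B's space-free scan
theorem pvTok (chunk : Int) (hc : 1 ≤ chunk) (t : List Char) :
    (if (t.length : Int) ≤ chunk then t
     else PySem.Chars.join ['\n'] ((PySem.List.pyRange 0 (t.length : Int) chunk).map
       (fun i => PySem.List.slice t (some i) (some (i + chunk))))) = pvH chunk 0 t := by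
  by_cases hle : (t.length : Int) ≤ chunk
  · rw [if_pos hle]
    exact (pvH_small chunk hc t 0 (by push_cast; omega)).symm
  · rw [if_neg hle]
    push_neg at hle
    have ht : t ≠ [] := by
      apply List.ne_nil_of_length_pos
      omega
    set c := chunk.toNat with hcdef
    have hcc : (c : Int) = chunk := by omega
    have hrange : PySem.List.pyRange 0 (t.length : Int) chunk
        = (List.range ((t.length - 1) / c + 1)).map (fun k => ((c * k : Nat) : Int)) := by
      rw [PySem.List.pyRange_of_pos _ _ (by omega)]
      have hlt : (0 : Int) < t.length := by omega
      rw [if_pos hlt]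
      have hcount : (((t.length : Int) - 0 + chunk - 1) / chunk).toNat = (t.length - 1) / c + 1 := by
        have h1 : (t.length : Int) - 0 + chunk - 1 = ((t.length - 1 + c : Nat) : Int) := by push_cast; omega
        rw [h1, ← hcc, ← Int.natCast_ediv]
        have h2 : (t.length - 1 + c) / c = (t.length - 1) / c + 1 := Nat.add_div_right _ (by omega)
        rw [h2]; exact Int.toNat_natCast _
      rw [hcount]
      apply List.map_congr_left
      intro k _
      rw [← hcc]; push_cast; ring
    rw [hrange, List.map_map]
    have hmap : ((fun i => PySem.List.slice t (some i) (some (i + chunk))) ∘ (fun k => ((c * k : Nat) : Int)))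
        = fun k => (t.drop (c * k)).take c := by
      funext k
      simp only [Function.comp_apply]
      have : ((c * k : Nat) : Int) + chunk = ((c * k : Nat) : Int) + ((c : Nat) : Int) := by rw [hcc]
      rw [this, PySem.List.slice_natCast_add]
    rw [hmap]
    exact pvPieces chunk hc t.length t rfl ht

-- B's foldl in terms of the recursion pvG
theorem pvFold (chunk : Int) (l : List Char) : ∀ (buf : List Char) (n : Nat),
    (l.foldl (fun (st : List Char × Nat) ch =>
      if ch = ' ' then (st.1 ++ [ch], 0)
      else
        let buf := if 0 < st.2 ∧ PySem.Int.mod (st.2 : Int) chunk = 0 then st.1 ++ ['\n'] else st.1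
        (buf ++ [ch], st.2 + 1)) (buf, n)).1 = buf ++ pvG chunk n l := by
  induction l with
  | nil => intro buf n; simp [pvG]
  | cons ch l ih =>
    intro buf n
    by_cases hch : ch = ' '
    · subst hch
      simp only [List.foldl_cons, if_pos rfl, ih, pvG]
      simp
    · simp only [List.foldl_cons, if_neg hch, ih, pvG, pvBrk]
      by_cases hbr : 0 < n ∧ PySem.Int.mod (n : Int) chunk = 0 <;> simp [hbr, hch]

-- main: A's join-of-mapped-tokens equals B's scan, generalized over a pending prefix token
theorem pvMain (chunk : Int) (hc : 1 ≤ chunk) (s : List Char) : ∀ pre : List Char,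
    PySem.Chars.join [' ']
      (((pre ++ (pvF s).headI) :: (pvF s).tail).map (fun token =>
        if (token.length : Int) ≤ chunk then token
        else PySem.Chars.join ['\n'] ((PySem.List.pyRange 0 (token.length : Int) chunk).map
          (fun i => PySem.List.slice token (some i) (some (i + chunk))))))
      = pvH chunk 0 pre ++ pvG chunk pre.length s := by
  induction s with
  | nil =>
    intro pre
    have hFs : pvF [] = [[]] := rfl
    rw [hFs]
    simp only [List.headI_cons, List.tail_cons, List.append_nil, List.map_cons, List.map_nil]
    rw [PySem.Chars.join_singleton, pvTok chunk hc pre]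
    simp [pvG]
  | cons ch l ih =>
    intro pre
    by_cases hch : ch = ' '
    · subst hch
      obtain ⟨a, t, hF⟩ : ∃ a t, pvF l = a :: t := by
        cases hF : pvF l with
        | nil => exact absurd hF (pvF_ne_nil l)
        | cons a t => exact ⟨a, t, rfl⟩
      have hFs : pvF (' ' :: l) = [] :: a :: t := by
        show (if ' ' = ' ' then [] :: pvF l else _) = _
        rw [if_pos rfl, hF]
      rw [hFs]
      simp only [List.headI_cons, List.tail_cons, List.append_nil, List.map_cons]
      rw [PySem.Chars.join_cons_cons]
      have hih := ih []
      rw [hF] at hih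
      simp only [List.headI_cons, List.tail_cons, List.nil_append, List.map_cons, pvH,
        List.length_nil] at hih
      rw [hih, pvTok chunk hc pre]
      have hG : pvG chunk pre.length (' ' :: l) = ' ' :: pvG chunk 0 l := by
        show (if ' ' = ' ' then _ else _) = _
        rw [if_pos rfl]
      rw [hG]
      simp
    · have hFs : pvF (ch :: l) = (ch :: (pvF l).headI) :: (pvF l).tail := by
        show (if ch = ' ' then _ else (ch :: (pvF l).headI) :: (pvF l).tail) = _
        rw [if_neg hch]
      rw [hFs]
      simp only [List.headI_cons, List.tail_cons]
      have harr : pre ++ ch :: (pvF l).headI = (pre ++ [ch]) ++ (pvF l).headI := by simp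
      rw [harr, ih (pre ++ [ch])]
      have hG : pvG chunk pre.length (ch :: l)
          = pvBrk chunk pre.length ++ ch :: pvG chunk (pre.length + 1) l := by
        show (if ch = ' ' then _ else _) = _
        rw [if_neg hch]
      rw [hG, pvH_append]
      have hone : pvH chunk (0 + pre.length) [ch] = pvBrk chunk pre.length ++ [ch] := by
        simp [pvH]
      rw [List.length_append, hone]
      simp

-- the two cores agree at the list level
theorem pvCore (chunk : Int) (hc : 1 ≤ chunk) (l : List Char) :
    PySem.Chars.join [' ']
      ((PySem.Chars.splitOn l [' ']).foldl (fun out token =>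
        if (token.length : Int) ≤ chunk then out ++ [token]
        else
          let pieces := (PySem.List.pyRange 0 (token.length : Int) chunk).map
            (fun i => PySem.List.slice token (some i) (some (i + chunk)))
          out ++ [PySem.Chars.join ['\n'] pieces]) [])
      = (l.foldl (fun (st : List Char × Nat) ch =>
          if ch = ' ' then (st.1 ++ [ch], 0)
          else
            let buf := if 0 < st.2 ∧ PySem.Int.mod (st.2 : Int) chunk = 0 then st.1 ++ ['\n'] else st.1
            (buf ++ [ch], st.2 + 1)) ([], 0)).1 := by
  rw [pvFold chunk l [] 0, List.nil_append]
  have hfun : (fun (out : List (List Char)) (token : List Char) =>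
      if (token.length : Int) ≤ chunk then out ++ [token]
      else
        let pieces := (PySem.List.pyRange 0 (token.length : Int) chunk).map
          (fun i => PySem.List.slice token (some i) (some (i + chunk)))
        out ++ [PySem.Chars.join ['\n'] pieces])
      = fun out token => out ++ [if (token.length : Int) ≤ chunk then token
          else PySem.Chars.join ['\n'] ((PySem.List.pyRange 0 (token.length : Int) chunk).map
            (fun i => PySem.List.slice token (some i) (some (i + chunk))))] := by
    funext out token
    by_cases h : (token.length : Int) ≤ chunk <;> simp [h]
  rw [hfun, PySem.List.foldl_append_singleton_eq_map, List.nil_append, pvSplitOn_eq_pvF]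
  have hm := pvMain chunk hc l []
  simp only [List.nil_append, pvH, List.length_nil] at hm
  obtain ⟨a, t, hF⟩ : ∃ a t, pvF l = a :: t := by
    cases hF : pvF l with
    | nil => exact absurd hF (pvF_ne_nil l)
    | cons a t => exact ⟨a, t, rfl⟩
  rw [hF] at hm ⊢
  simp only [List.headI_cons, List.tail_cons] at hm
  exact hm

-- ===== VERDICT (by name: the statement is the Claim_ definition above) =====
theorem wrap_long_unbroken_py_spec : Claim_equal_wrap_long_unbroken_py := by
  intro text chunk _ hpre
  unfold Spec_wrap_long_unbroken_py wrap_long_unbroken_py wrap_long_unbroken_py_alt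
  by_cases hempty : pvSanitize text = ""
  · simp only [hempty, if_pos]
  · simp only [if_neg hempty]
    exact congrArg String.ofList (pvCore chunk hpre (pvSanitize text).toList)
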